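-- pv_equiv track=rewrite | github.com/Tony363/5511 | hw10/graph_reachability.py | find_smallest_reachable_vertices
-- ===== SOURCE A (Python) =====
-- from collections import defaultdict
--
-- def transpose_graph(graph):
--     """
--     Transposes the given graph.
--
--     Args:
--         graph (dict): The original graph represented as an adjacency list.
--
--     Returns:
--         dict: The transposed graph.
--     """
--     transposed = defaultdict(list)
--     for u in graph:
--         for v in graph[u]:
--             transposed[v].append(u)
--     return transposed
--
-- def dfs(graph, u, visited, component, marked):
--     """
--     Performs Depth-First Search (DFS) on the transposed graph, avoiding already marked nodes.
--
--     Args: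
--         graph (dict): The transposed graph.
--         u (int): The current vertex.
--         visited (set): Set of visited vertices during this DFS call.
--         component (list): List to store the connected component vertices.
--         marked (set): Set of all vertices that have been assigned a smallest reachable vertex.
--     """
--     if u in marked:
--         return
--     visited.add(u)
--     component.append(u)
--     for v in graph.get(u, []):
--         if v not in visited and v not in marked:
--             dfs(graph, v, visited, component, marked)
--
-- def find_smallest_reachable_vertices(graph):
--     """
--     Finds the smallest reachable vertex for each vertex in the graph.
--
--     Args:
--         graph (dict): The original graph represented as an adjacency list.
--
--     Returns:
--         dict: Mapping from each vertex to the smallest reachable vertex.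
--     """
--     transposed = transpose_graph(graph)
--     marked = set()
--     result = {}
--     for v in sorted(graph.keys()):
--         if v not in marked:
--             visited = set()
--             component = []
--             dfs(transposed, v, visited, component, marked)
--             for u in component:
--                 result[u] = v
--             marked.update(component)
--     return result
-- ===== SOURCE B (Python) =====
-- def find_smallest_reachable_vertices(graph):
--     """Finds the smallest reachable vertex for each vertex in the graph.
--
--     Iterative re-implementation: one explicit-stack DFS per unassigned root on
--     the transposed graph, writing into the result dict directly (the result's
--     key set doubles as the visited/marked bookkeeping).
--     """
--     rev = {}
--     for u, nbrs in graph.items():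
--         for v in nbrs:
--             rev.setdefault(v, []).append(u)
--     result = {}
--     for v in sorted(graph):
--         if v in result:
--             continue
--         stack = [v]
--         while stack:
--             u = stack.pop()
--             if u in result:
--                 continue
--             result[u] = v
--             stack.extend(reversed(rev.get(u, [])))
--     return result
-- ===== Notes on version B (the rewrite author's own statement) =====
-- stated objective: alternative
-- what changed: The recursive dfs with its three auxiliary structures (per-call visited set, component list, global marked set copied into result afterwards) is replaced by an iterative explicit-stack DFS that writes each vertex straight into the result dict, whose key set is the only visited/marked bookkeeping kept; the transpose is built with setdefault instead of a defaultdict.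
import Mathlib
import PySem

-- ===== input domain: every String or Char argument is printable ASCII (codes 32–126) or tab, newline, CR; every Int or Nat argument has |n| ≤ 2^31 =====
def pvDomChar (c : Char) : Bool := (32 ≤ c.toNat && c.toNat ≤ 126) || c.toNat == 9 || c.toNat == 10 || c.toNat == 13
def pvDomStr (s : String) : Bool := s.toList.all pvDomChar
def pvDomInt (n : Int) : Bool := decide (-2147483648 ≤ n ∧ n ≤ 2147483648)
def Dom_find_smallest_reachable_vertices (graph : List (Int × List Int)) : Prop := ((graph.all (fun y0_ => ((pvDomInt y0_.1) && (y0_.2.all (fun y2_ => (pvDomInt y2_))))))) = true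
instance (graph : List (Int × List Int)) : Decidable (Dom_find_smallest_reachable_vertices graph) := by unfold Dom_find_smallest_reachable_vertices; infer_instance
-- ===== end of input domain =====

-- B replaces the recursive per-component DFS (with its visited set, component list and marked
-- set) by an explicit-stack DFS writing straight into the result dict, whose key set is the
-- only bookkeeping kept (objective: simpler state, iterative instead of recursive).

-- ===== PORT A =====
-- transpose_graph: defaultdict(list); transposed[v].append(u)  (iterating the dict's pairs)
def transpose_graph (graph : List (Int × List Int)) : PySem.Dict Int (List Int) :=
  graph.foldl (fun t p =>
    p.2.foldl (fun t v => t.insert v (t.getD v [] ++ [p.1])) t) PySem.Dict.empty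

-- dfs: A's recursive DFS; the fuel only makes the recursion total (each recursive call adds a
-- new graph key to visited, so the call site's graph.length + 1 never runs out)
def dfs (t : PySem.Dict Int (List Int)) (fuel : Nat) (u : Int)
    (visited : PySem.Set Int) (component : List Int) (marked : PySem.Set Int) :
    PySem.Set Int × List Int :=
  match fuel with
  | 0 => (visited, component)
  | fuel + 1 =>
    if PySem.Set.contains marked u then (visited, component)
    else
      (t.getD u []).foldl
        (fun s v =>
          if !(PySem.Set.contains s.1 v) && !(PySem.Set.contains marked v) then
            dfs t fuel v s.1 s.2 marked
          else s)
        (PySem.Set.add visited u, component ++ [u])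

def find_smallest_reachable_vertices (graph : List (Int × List Int)) : List (Int × Int) :=
  let transposed := transpose_graph graph
  let res := (PySem.List.sorted (graph.map Prod.fst) (fun x => x) false).foldl
    (fun (st : PySem.Set Int × PySem.Dict Int Int) v =>
      if !(PySem.Set.contains st.1 v) then
        let component := (dfs transposed (graph.length + 1) v PySem.Set.empty [] st.1).2
        (PySem.Set.update st.1 component,                   -- marked.update(component)
         component.foldl (fun r u => r.insert u v) st.2)   -- for u in component: result[u] = v
      else st)
    (PySem.Set.empty, PySem.Dict.empty)
  res.2.items

-- ===== PORT B =====
-- rev.setdefault(v, []).append(u) = rev[v] becomes rev.get(v, []) + [u]  (iterating the dict's pairs)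
def pvRev (graph : List (Int × List Int)) : PySem.Dict Int (List Int) :=
  graph.foldl (fun r p =>
    p.2.foldl (fun r v => r.modify v [] (· ++ [p.1])) r) PySem.Dict.empty

-- the while-stack loop.  Python's stack has its top at the END (pop() / extend(reversed(ns)));
-- the Lean list keeps the top at the HEAD, so extend(reversed(ns)) is ns ++ stack.  The fuel only
-- makes the loop total (every pop either discards or assigns a fresh vertex, pushes ≤ edge count).
def dfs_stack (rev : PySem.Dict Int (List Int)) (root : Int) (fuel : Nat)
    (stack : List Int) (result : PySem.Dict Int Int) : PySem.Dict Int Int :=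
  match fuel, stack with
  | _, [] => result
  | 0, _ :: _ => result
  | fuel + 1, u :: stack =>
    if result.contains u then dfs_stack rev root fuel stack result
    else dfs_stack rev root fuel (rev.getD u [] ++ stack) (result.insert u root)

def find_smallest_reachable_vertices_alt (graph : List (Int × List Int)) : List (Int × Int) :=
  let rev := pvRev graph
  let res := (PySem.List.sorted (graph.map Prod.fst) (fun x => x) false).foldl
    (fun (result : PySem.Dict Int Int) v =>
      if result.contains v then result
      else dfs_stack rev v (graph.length + (graph.map (fun p => p.2.length)).sum + 1) [v] result)
    PySem.Dict.empty
  res.items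

-- ===== PRECONDITION & SPEC =====
def Spec_find_smallest_reachable_vertices (graph : List (Int × List Int)) (out : List (Int × Int)) : Prop := out = find_smallest_reachable_vertices_alt graph
instance (graph : List (Int × List Int)) (out : List (Int × Int)) : Decidable (Spec_find_smallest_reachable_vertices graph out) := by unfold Spec_find_smallest_reachable_vertices; infer_instance

-- ===== CLAIM (what is proved, stated in full; the proofs are below) =====
def Claim_equal_find_smallest_reachable_vertices : Prop := ∀ (graph : List (Int × List Int)), Dom_find_smallest_reachable_vertices graph → Spec_find_smallest_reachable_vertices graph (find_smallest_reachable_vertices graph)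

-- ===== LEMMAS AND PROOFS =====

-- A's inner for-loop over the children of a node, as a standalone fold (dfs (fuel+1) unfolds to it)
def pvDfsAL (t : PySem.Dict Int (List Int)) (marked : PySem.Set Int) (fuel : Nat)
    (xs : List Int) (s : PySem.Set Int × List Int) : PySem.Set Int × List Int :=
  xs.foldl
    (fun s v =>
      if !(PySem.Set.contains s.1 v) && !(PySem.Set.contains marked v) then
        dfs t fuel v s.1 s.2 marked
      else s) s

-- the still-unseen vertices among Ulist, and the potential functions for the fuel bounds
def pvW (Ulist marked vis : List Int) : Finset Int :=
  Ulist.toFinset.filter (fun x => x ∉ vis ∧ x ∉ marked)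

def pvM (Ulist marked vis : List Int) : Nat := (pvW Ulist marked vis).card

def pvPhi (t : PySem.Dict Int (List Int)) (Ulist marked vis : List Int) : Nat :=
  ∑ x ∈ pvW Ulist marked vis, (1 + (t.getD x []).length)

theorem pvDfsAL_nil (t : PySem.Dict Int (List Int)) (marked : PySem.Set Int) (f : Nat)
    (s : PySem.Set Int × List Int) : pvDfsAL t marked f [] s = s := rfl

theorem pvDfsAL_cons (t : PySem.Dict Int (List Int)) (marked : PySem.Set Int) (f : Nat)
    (x : Int) (xs : List Int) (s : PySem.Set Int × List Int) :
    pvDfsAL t marked f (x :: xs) s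
      = pvDfsAL t marked f xs
          (if !(PySem.Set.contains s.1 x) && !(PySem.Set.contains marked x) then
             dfs t f x s.1 s.2 marked
           else s) := rfl

theorem pvDfsAL_append (t : PySem.Dict Int (List Int)) (marked : PySem.Set Int) (f : Nat)
    (xs ys : List Int) (s : PySem.Set Int × List Int) :
    pvDfsAL t marked f (xs ++ ys) s = pvDfsAL t marked f ys (pvDfsAL t marked f xs s) :=
  List.foldl_append ..

theorem pvDfs_succ (t : PySem.Dict Int (List Int)) (marked : PySem.Set Int) (f : Nat)
    (u : Int) (vis : PySem.Set Int) (comp : List Int) :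
    dfs t (f + 1) u vis comp marked
      = if PySem.Set.contains marked u then (vis, comp)
        else pvDfsAL t marked f (t.getD u []) (PySem.Set.add vis u, comp ++ [u]) := rfl

theorem pvDfsAL_zero (t : PySem.Dict Int (List Int)) (marked : PySem.Set Int)
    (xs : List Int) (s : PySem.Set Int × List Int) : pvDfsAL t marked 0 xs s = s := by
  induction xs generalizing s with
  | nil => rfl
  | cons x xs ih =>
    rw [pvDfsAL_cons]
    have h : (if !(PySem.Set.contains s.1 x) && !(PySem.Set.contains marked x) then
        dfs t 0 x s.1 s.2 marked else s) = s := by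
      split <;> simp [dfs]
    rw [h]; exact ih s

theorem pvDfsAL_mono (t : PySem.Dict Int (List Int)) (marked : PySem.Set Int) :
    ∀ (f : Nat) (xs : List Int) (s : PySem.Set Int × List Int) (y : Int),
      y ∈ s.1 → y ∈ (pvDfsAL t marked f xs s).1 := by
  intro f
  induction f with
  | zero => intro xs s y hy; rw [pvDfsAL_zero]; exact hy
  | succ m ihm =>
    intro xs
    induction xs with
    | nil => intro s y hy; exact hy
    | cons x xs ihxs =>
      intro s y hy
      rw [pvDfsAL_cons]
      apply ihxs
      split
      · rw [pvDfs_succ]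
        split
        · exact hy
        · apply ihm
          simp [PySem.Set.mem_add, hy]
      · exact hy

theorem pvDfsAL_acc (t : PySem.Dict Int (List Int)) (marked : PySem.Set Int) :
    ∀ (f : Nat) (xs : List Int) (vis : PySem.Set Int) (comp : List Int),
      pvDfsAL t marked f xs (vis, comp)
        = ((pvDfsAL t marked f xs (vis, [])).1,
           comp ++ (pvDfsAL t marked f xs (vis, [])).2) := by
  intro f
  induction f with
  | zero => intro xs vis comp; rw [pvDfsAL_zero, pvDfsAL_zero]; simp
  | succ m ihm =>
    intro xs
    induction xs with
    | nil => intro vis comp; simp [pvDfsAL_nil]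
    | cons x xs ihxs =>
      intro vis comp
      rw [pvDfsAL_cons, pvDfsAL_cons]
      cases hguard : (!(PySem.Set.contains vis x) && !(PySem.Set.contains marked x)) with
      | false => simp only [if_false, Bool.false_eq_true]; exact ihxs vis comp
      | true =>
        have hmx : PySem.Set.contains marked x = false := by
          have := hguard; simp only [Bool.and_eq_true, Bool.not_eq_true'] at this
          exact this.2
        simp only [if_true]
        rw [pvDfs_succ, pvDfs_succ, hmx]
        simp only [Bool.false_eq_true, if_false]
        have h1 := ihm (t.getD x []) (PySem.Set.add vis x) (comp ++ [x])
        have h2 := ihm (t.getD x []) (PySem.Set.add vis x) ([] ++ [x])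
        rw [h1, h2]
        have h3 := ihxs (pvDfsAL t marked m (t.getD x []) (PySem.Set.add vis x, [])).1
          ((comp ++ [x]) ++ (pvDfsAL t marked m (t.getD x []) (PySem.Set.add vis x, [])).2)
        have h4 := ihxs (pvDfsAL t marked m (t.getD x []) (PySem.Set.add vis x, [])).1
          (([] ++ [x]) ++ (pvDfsAL t marked m (t.getD x []) (PySem.Set.add vis x, [])).2)
        rw [h3, h4]
        simp [List.append_assoc]

theorem pvM_antitone (Ulist marked : List Int) (vis vis' : List Int)
    (h : ∀ y, y ∈ vis → y ∈ vis') : pvM Ulist marked vis' ≤ pvM Ulist marked vis := by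
  apply Finset.card_le_card
  intro y hy
  simp only [pvW, Finset.mem_filter, List.mem_toFinset] at *
  exact ⟨hy.1, fun hmem => hy.2.1 (h y hmem), hy.2.2⟩

theorem pvW_add (Ulist marked vis : List Int) (x : Int)
    (_hU : x ∈ Ulist) (_hv : x ∉ vis) (_hm : x ∉ marked) :
    pvW Ulist marked (PySem.Set.add vis x) = (pvW Ulist marked vis).erase x := by
  ext y
  simp only [pvW, Finset.mem_erase, Finset.mem_filter, List.mem_toFinset, PySem.Set.mem_add]
  constructor
  · rintro ⟨h1, h2, h3⟩
    exact ⟨fun he => h2 (Or.inr he), h1, fun hv' => h2 (Or.inl hv'), h3⟩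
  · rintro ⟨hne, h1, h2, h3⟩
    exact ⟨h1, fun hc => hc.elim h2 hne, h3⟩

theorem pvM_add (Ulist marked vis : List Int) (x : Int)
    (hU : x ∈ Ulist) (hv : x ∉ vis) (hm : x ∉ marked) :
    pvM Ulist marked (PySem.Set.add vis x) + 1 = pvM Ulist marked vis := by
  unfold pvM
  rw [pvW_add Ulist marked vis x hU hv hm]
  exact Finset.card_erase_add_one (by simp [pvW, hU, hv, hm])

theorem pvPhi_add (t : PySem.Dict Int (List Int)) (Ulist marked vis : List Int) (x : Int)
    (hU : x ∈ Ulist) (hv : x ∉ vis) (hm : x ∉ marked) :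
    pvPhi t Ulist marked (PySem.Set.add vis x) + (1 + (t.getD x []).length)
      = pvPhi t Ulist marked vis := by
  unfold pvPhi
  rw [pvW_add Ulist marked vis x hU hv hm]
  exact Finset.sum_erase_add _ _ (by simp [pvW, hU, hv, hm])

-- fuel irrelevance: any two sufficiently large fuels give the same DFS result
theorem pvDfsAL_fi (t : PySem.Dict Int (List Int)) (Ulist marked : List Int)
    (Hch : ∀ u x, x ∈ t.getD u [] → x ∈ Ulist) :
    ∀ (n f f' : Nat) (xs : List Int) (vis : PySem.Set Int) (comp : List Int),
      (∀ x ∈ xs, x ∈ Ulist) → pvM Ulist marked vis ≤ n → n < f → n < f' →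
      pvDfsAL t marked f xs (vis, comp) = pvDfsAL t marked f' xs (vis, comp) := by
  intro n
  induction n with
  | zero =>
    intro f f' xs
    induction xs with
    | nil => intro vis comp _ _ _ _; rfl
    | cons x xs ihxs =>
      intro vis comp hxs hm hf hf'
      rw [pvDfsAL_cons, pvDfsAL_cons]
      cases hguard : (!(PySem.Set.contains vis x) && !(PySem.Set.contains marked x)) with
      | false => exact ihxs vis comp (fun y hy => hxs y (List.mem_cons_of_mem _ hy)) hm hf hf'
      | true =>
        exfalso
        simp only [Bool.and_eq_true, Bool.not_eq_true', PySem.Set.contains_eq_listContains] at hguard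
        have hxW : x ∈ pvW Ulist marked vis := by
          simp only [pvW, Finset.mem_filter, List.mem_toFinset]
          refine ⟨hxs x List.mem_cons_self, ?_, ?_⟩
          · simpa using hguard.1
          · simpa using hguard.2
        have : 0 < pvM Ulist marked vis := Finset.card_pos.mpr ⟨x, hxW⟩
        omega
  | succ n' ihn =>
    intro f f' xs
    induction xs with
    | nil => intro vis comp _ _ _ _; rfl
    | cons x xs ihxs =>
      intro vis comp hxs hm hf hf'
      rw [pvDfsAL_cons, pvDfsAL_cons]
      cases hguard : (!(PySem.Set.contains vis x) && !(PySem.Set.contains marked x)) with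
      | false => exact ihxs vis comp (fun y hy => hxs y (List.mem_cons_of_mem _ hy)) hm hf hf'
      | true =>
        have hg : x ∉ vis ∧ x ∉ marked := by
          simp only [Bool.and_eq_true, Bool.not_eq_true', PySem.Set.contains_eq_listContains] at hguard
          constructor
          · simpa using hguard.1
          · simpa using hguard.2
        have hxU : x ∈ Ulist := hxs x List.mem_cons_self
        have hmx : PySem.Set.contains marked x = false := by
          simp [PySem.Set.contains_eq_listContains, hg.2]
        obtain ⟨fa, rfl⟩ : ∃ fa, f = fa + 1 := ⟨f - 1, by omega⟩
        obtain ⟨fb, rfl⟩ : ∃ fb, f' = fb + 1 := ⟨f' - 1, by omega⟩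
        rw [pvDfs_succ, pvDfs_succ, hmx]
        simp only [Bool.false_eq_true, if_false]
        have hmadd : pvM Ulist marked (PySem.Set.add vis x) ≤ n' := by
          have := pvM_add Ulist marked vis x hxU hg.1 hg.2
          omega
        have hch : ∀ y ∈ t.getD x [], y ∈ Ulist := fun y hy => Hch x y hy
        have heq1 : pvDfsAL t marked fa (t.getD x []) (PySem.Set.add vis x, comp ++ [x])
            = pvDfsAL t marked fb (t.getD x []) (PySem.Set.add vis x, comp ++ [x]) :=
          ihn fa fb (t.getD x []) (PySem.Set.add vis x) (comp ++ [x]) hch hmadd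
            (by omega) (by omega)
        rw [heq1]
        have hsub : ∀ y, y ∈ vis →
            y ∈ (pvDfsAL t marked fb (t.getD x []) (PySem.Set.add vis x, comp ++ [x])).1 :=
          fun y hy => pvDfsAL_mono t marked fb _ _ y (by simp [PySem.Set.mem_add, hy])
        have hm' : pvM Ulist marked
            (pvDfsAL t marked fb (t.getD x []) (PySem.Set.add vis x, comp ++ [x])).1 ≤ n' + 1 :=
          le_trans (pvM_antitone Ulist marked vis _ hsub) hm
        exact ihxs _ _ (fun y hy => hxs y (List.mem_cons_of_mem _ hy)) hm' hf hf'

theorem pvBridge (t : PySem.Dict Int (List Int)) (Ulist marked : List Int)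
    (Hch : ∀ u x, x ∈ t.getD u [] → x ∈ Ulist) (root : Int) :
    ∀ (fb fa : Nat) (pending : List Int) (R : PySem.Dict Int Int) (vis : PySem.Set Int),
      (∀ x : Int, R.contains x = true ↔ x ∈ vis ∨ x ∈ marked) →
      (∀ x ∈ pending, x ∈ Ulist) →
      pending.length + pvPhi t Ulist marked vis ≤ fb →
      pvM Ulist marked vis < fa →
      dfs_stack t root fb pending R
        = (pvDfsAL t marked fa pending (vis, [])).2.foldl (fun r u => r.insert u root) R := by
  intro fb
  induction fb with
  | zero =>
    intro fa pending R vis _ _ hfuel _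
    cases pending with
    | nil => rfl
    | cons u rest => simp only [List.length_cons] at hfuel; omega
  | succ fb ih =>
    intro fa pending R vis hInv hp hfuel hfa
    cases pending with
    | nil => rfl
    | cons u rest =>
      have hstep : dfs_stack t root (fb + 1) (u :: rest) R
          = if R.contains u then dfs_stack t root fb rest R
            else dfs_stack t root fb (t.getD u [] ++ rest) (R.insert u root) := rfl
      rw [hstep, pvDfsAL_cons]
      cases hRu : R.contains u with
      | true =>
        have huvm : u ∈ vis ∨ u ∈ marked := (hInv u).mp hRu
        have hguard : (!(PySem.Set.contains vis u) && !(PySem.Set.contains marked u)) = false := by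
          rcases huvm with h | h <;>
            simp [PySem.Set.contains_eq_listContains, h]
        rw [hguard]
        simp only [Bool.false_eq_true, if_false, if_true]
        apply ih fa rest R vis hInv (fun y hy => hp y (List.mem_cons_of_mem _ hy))
          (by simp only [List.length_cons] at hfuel; omega) hfa
      | false =>
        have huvm : ¬(u ∈ vis ∨ u ∈ marked) := fun h => by
          rw [(hInv u).mpr h] at hRu; exact Bool.true_eq_false.mp hRu
        have huv : u ∉ vis := fun h => huvm (Or.inl h)
        have hum : u ∉ marked := fun h => huvm (Or.inr h)
        have huU : u ∈ Ulist := hp u List.mem_cons_self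
        have hguard : (!(PySem.Set.contains vis u) && !(PySem.Set.contains marked u)) = true := by
          simp [PySem.Set.contains_eq_listContains, huv, hum]
        rw [hguard]
        simp only [Bool.false_eq_true, if_false, if_true]
        obtain ⟨m0, rfl⟩ : ∃ m0, fa = m0 + 1 := ⟨fa - 1, by omega⟩
        have hmu : PySem.Set.contains marked u = false := by
          simp [PySem.Set.contains_eq_listContains, hum]
        rw [pvDfs_succ, hmu]
        simp only [Bool.false_eq_true, if_false, List.nil_append]
        have hMeq := pvM_add Ulist marked vis u huU huv hum
        have hPeq := pvPhi_add t Ulist marked vis u huU huv hum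
        have hfi : pvDfsAL t marked m0 (t.getD u []) (PySem.Set.add vis u, [u])
            = pvDfsAL t marked (m0 + 1) (t.getD u []) (PySem.Set.add vis u, [u]) :=
          pvDfsAL_fi t Ulist marked Hch (pvM Ulist marked (PySem.Set.add vis u))
            m0 (m0 + 1) (t.getD u []) (PySem.Set.add vis u) [u]
            (fun y hy => Hch u y hy) le_rfl (by omega) (by omega)
        rw [hfi, ← pvDfsAL_append]
        have hacc := pvDfsAL_acc t marked (m0 + 1) (t.getD u [] ++ rest)
          (PySem.Set.add vis u) [u]
        rw [hacc]
        simp only [List.cons_append, List.nil_append, List.foldl_cons]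
        exact ih (m0 + 1) (t.getD u [] ++ rest) (R.insert u root) (PySem.Set.add vis u)
          (fun x => by
            rw [PySem.Dict.contains_insert]
            simp only [Bool.or_eq_true, beq_iff_eq, PySem.Set.mem_add]
            constructor
            · rintro (h | h)
              · exact Or.inl (Or.inr h)
              · rcases (hInv x).mp h with h' | h'
                · exact Or.inl (Or.inl h')
                · exact Or.inr h'
            · rintro (h | h)
              · rcases h with h' | h'
                · exact Or.inr ((hInv x).mpr (Or.inl h'))
                · exact Or.inl h'
              · exact Or.inr ((hInv x).mpr (Or.inr h)))
          (fun y hy => by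
            rcases List.mem_append.mp hy with h | h
            · exact Hch u y h
            · exact hp y (List.mem_cons_of_mem _ h))
          (by
            simp only [List.length_append, List.length_cons] at hfuel ⊢
            omega)
          (by omega)

theorem pvContains_foldl_insert (δ : List Int) (R : PySem.Dict Int Int) (root x : Int) :
    ((δ.foldl (fun r u => r.insert u root) R).contains x = true) ↔ x ∈ δ ∨ R.contains x = true := by
  induction δ generalizing R with
  | nil => simp
  | cons u δ ih =>
    rw [List.foldl_cons, ih]
    rw [PySem.Dict.contains_insert]
    simp only [Bool.or_eq_true, beq_iff_eq, List.mem_cons]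
    tauto

theorem pvChildU (g : List (Int × List Int)) :
    ∀ u x, x ∈ (transpose_graph g).getD u [] → x ∈ g.map Prod.fst := by
  have inner : ∀ (vs : List Int) (w : Int) (d : PySem.Dict Int (List Int)),
      w ∈ g.map Prod.fst →
      (∀ u x, x ∈ d.getD u [] → x ∈ g.map Prod.fst) →
      (∀ u x, x ∈ (vs.foldl (fun t v => t.insert v (t.getD v [] ++ [w])) d).getD u [] →
        x ∈ g.map Prod.fst) := by
    intro vs
    induction vs with
    | nil => intro w d hw hd; exact hd
    | cons v vs ih =>
      intro w d hw hd
      rw [List.foldl_cons]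
      apply ih w _ hw
      intro u x hx
      rw [PySem.Dict.getD_insert] at hx
      split at hx
      · rcases List.mem_append.mp hx with h | h
        · exact hd v x h
        · rw [List.mem_singleton.mp h]; exact hw
      · exact hd u x hx
  have outer : ∀ (gs : List (Int × List Int)) (d : PySem.Dict Int (List Int)),
      (∀ p ∈ gs, p.1 ∈ g.map Prod.fst) →
      (∀ u x, x ∈ d.getD u [] → x ∈ g.map Prod.fst) →
      (∀ u x, x ∈ (gs.foldl (fun t p => p.2.foldl (fun t v => t.insert v (t.getD v [] ++ [p.1])) t) d).getD u [] →
        x ∈ g.map Prod.fst) := by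
    intro gs
    induction gs with
    | nil => intro d _ hd; exact hd
    | cons p gs ih =>
      intro d hgs hd
      rw [List.foldl_cons]
      exact ih _ (fun q hq => hgs q (List.mem_cons_of_mem _ hq))
        (inner p.2 p.1 d (hgs p List.mem_cons_self) hd)
  apply outer g PySem.Dict.empty (fun p hp => List.mem_map.mpr ⟨p, hp, rfl⟩)
  intro u x hx
  simp [PySem.Dict.getD_empty] at hx

theorem pvDegsum (g : List (Int × List Int)) (S : Finset Int) :
    ∑ x ∈ S, ((transpose_graph g).getD x []).length ≤ (g.map (fun p => p.2.length)).sum := by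
  have inner : ∀ (vs : List Int) (w : Int) (d : PySem.Dict Int (List Int)),
      ∑ x ∈ S, ((vs.foldl (fun t v => t.insert v (t.getD v [] ++ [w])) d).getD x []).length
        ≤ (∑ x ∈ S, (d.getD x []).length) + vs.length := by
    intro vs
    induction vs with
    | nil => intro w d; simp
    | cons v vs ih =>
      intro w d
      rw [List.foldl_cons]
      calc ∑ x ∈ S, ((vs.foldl (fun t v => t.insert v (t.getD v [] ++ [w]))
              (d.insert v (d.getD v [] ++ [w]))).getD x []).length
          ≤ (∑ x ∈ S, ((d.insert v (d.getD v [] ++ [w])).getD x []).length) + vs.length :=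
            ih w _
        _ ≤ ((∑ x ∈ S, (d.getD x []).length) + 1) + vs.length := by
            have hpt : ∑ x ∈ S, ((d.insert v (d.getD v [] ++ [w])).getD x []).length
                = ∑ x ∈ S, ((d.getD x []).length + if x = v then 1 else 0) := by
              apply Finset.sum_congr rfl
              intro x _
              rw [PySem.Dict.getD_insert]
              split <;> simp_all
            rw [hpt, Finset.sum_add_distrib]
            have : (∑ x ∈ S, if x = v then 1 else 0) ≤ 1 := by
              rw [Finset.sum_ite_eq' S v (fun _ => 1)]
              split <;> omega
            omega
        _ = (∑ x ∈ S, (d.getD x []).length) + (v :: vs).length := by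
            simp [List.length_cons]; omega
  have outer : ∀ (gs : List (Int × List Int)) (d : PySem.Dict Int (List Int)),
      ∑ x ∈ S, ((gs.foldl (fun t p => p.2.foldl (fun t v => t.insert v (t.getD v [] ++ [p.1])) t) d).getD x []).length
        ≤ (∑ x ∈ S, (d.getD x []).length) + (gs.map (fun p => p.2.length)).sum := by
    intro gs
    induction gs with
    | nil => intro d; simp
    | cons p gs ih =>
      intro d
      rw [List.foldl_cons]
      calc (∑ x ∈ S, ((gs.foldl _ (p.2.foldl (fun t v => t.insert v (t.getD v [] ++ [p.1])) d)).getD x []).length)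
          ≤ (∑ x ∈ S, ((p.2.foldl (fun t v => t.insert v (t.getD v [] ++ [p.1])) d).getD x []).length)
              + (gs.map (fun p => p.2.length)).sum := ih _
        _ ≤ ((∑ x ∈ S, (d.getD x []).length) + p.2.length) + (gs.map (fun p => p.2.length)).sum := by
            have := inner p.2 p.1 d
            omega
        _ = (∑ x ∈ S, (d.getD x []).length) + ((p :: gs).map (fun p => p.2.length)).sum := by
            simp [List.map_cons]; omega
  have h := outer g PySem.Dict.empty
  simp only [PySem.Dict.getD_empty, List.length_nil, Finset.sum_const_zero, zero_add] at h
  exact h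

-- the outer loop over the sorted keys
theorem pvOuter (g : List (Int × List Int)) :
    ∀ (ks : List Int) (marked : PySem.Set Int) (R : PySem.Dict Int Int),
      (∀ v ∈ ks, v ∈ g.map Prod.fst) →
      (∀ x : Int, R.contains x = true ↔ x ∈ marked) →
      (ks.foldl
        (fun (st : PySem.Set Int × PySem.Dict Int Int) v =>
          if !(PySem.Set.contains st.1 v) then
            (PySem.Set.update st.1 ((dfs (transpose_graph g) (g.length + 1) v PySem.Set.empty [] st.1).2),
             ((dfs (transpose_graph g) (g.length + 1) v PySem.Set.empty [] st.1).2).foldl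
               (fun r u => r.insert u v) st.2)
          else st) (marked, R)).2
      = ks.foldl
          (fun (result : PySem.Dict Int Int) v =>
            if result.contains v then result
            else dfs_stack (transpose_graph g) v
              (g.length + (g.map (fun p => p.2.length)).sum + 1) [v] result) R := by
  intro ks
  induction ks with
  | nil => intro marked R _ _; rfl
  | cons v ks ih =>
    intro marked R hks hInv
    rw [List.foldl_cons, List.foldl_cons]
    cases hv : PySem.Set.contains marked v with
    | true =>
      have hvm : v ∈ marked := by
        simpa [PySem.Set.contains_eq_listContains] using hv
      have hRv : R.contains v = true := (hInv v).mpr hvm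
      rw [hRv]
      simp only [Bool.not_true, Bool.false_eq_true, if_false, if_true]
      exact ih marked R (fun y hy => hks y (List.mem_cons_of_mem _ hy)) hInv
    | false =>
      have hvm : v ∉ marked := by
        intro h
        rw [show PySem.Set.contains marked v = true by
          simpa [PySem.Set.contains_eq_listContains] using h] at hv
        exact Bool.true_eq_false.mp hv
      have hRv : R.contains v = false := by
        cases h : R.contains v with
        | false => rfl
        | true => exact absurd ((hInv v).mp h) hvm
      rw [hRv]
      simp only [Bool.not_false, Bool.false_eq_true, if_false, if_true]
      have hvU : v ∈ g.map Prod.fst := hks v List.mem_cons_self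
      -- apply the bridge with pending = [v], vis = ∅
      have hInv0 : ∀ x : Int, R.contains x = true ↔ x ∈ (PySem.Set.empty : PySem.Set Int) ∨ x ∈ marked := by
        intro x
        rw [hInv x]
        simp [PySem.Set.empty]
      have hcard : (pvW (g.map Prod.fst) marked PySem.Set.empty).card ≤ g.length := by
        calc (pvW (g.map Prod.fst) marked PySem.Set.empty).card
            ≤ (g.map Prod.fst).toFinset.card := Finset.card_le_card (Finset.filter_subset _ _)
          _ ≤ (g.map Prod.fst).length := List.toFinset_card_le _
          _ = g.length := List.length_map ..
      have hphi : pvPhi (transpose_graph g) (g.map Prod.fst) marked PySem.Set.empty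
          ≤ g.length + (g.map (fun p => p.2.length)).sum := by
        unfold pvPhi
        calc ∑ x ∈ pvW (g.map Prod.fst) marked PySem.Set.empty,
              (1 + ((transpose_graph g).getD x []).length)
            = ∑ _x ∈ pvW (g.map Prod.fst) marked PySem.Set.empty, 1
              + ∑ x ∈ pvW (g.map Prod.fst) marked PySem.Set.empty,
                  ((transpose_graph g).getD x []).length := Finset.sum_add_distrib
          _ = (pvW (g.map Prod.fst) marked PySem.Set.empty).card
              + ∑ x ∈ pvW (g.map Prod.fst) marked PySem.Set.empty,
                  ((transpose_graph g).getD x []).length := by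
              rw [Finset.sum_const, smul_eq_mul, mul_one]
          _ ≤ g.length + (g.map (fun p => p.2.length)).sum :=
              Nat.add_le_add hcard (pvDegsum g _)
      have hbr := pvBridge (transpose_graph g) (g.map Prod.fst) marked (pvChildU g) v
        (g.length + (g.map (fun p => p.2.length)).sum + 1) (g.length + 1) [v] R PySem.Set.empty
        hInv0 (by intro y hy; rw [List.mem_singleton.mp hy]; exact hvU)
        (by have := hphi; simp only [List.length_cons, List.length_nil]; omega)
        (by show (pvW (g.map Prod.fst) marked PySem.Set.empty).card < g.length + 1; omega)
      rw [hbr]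
      have hAL : pvDfsAL (transpose_graph g) marked (g.length + 1) [v] (PySem.Set.empty, [])
          = dfs (transpose_graph g) (g.length + 1) v PySem.Set.empty [] marked := by
        rw [pvDfsAL_cons]
        have hguard : (!(PySem.Set.contains (PySem.Set.empty : PySem.Set Int) v)
            && !(PySem.Set.contains marked v)) = true := by
          simp [PySem.Set.contains_eq_listContains, PySem.Set.empty, hvm]
        rw [hguard]
        simp only [if_true]
        rfl
      rw [hAL]
      apply ih
      · exact fun y hy => hks y (List.mem_cons_of_mem _ hy)
      · intro x
        rw [pvContains_foldl_insert]
        simp only [PySem.Set.mem_update]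
        rw [hInv x]
        tauto
-- ===== VERDICT (by name: the statement is the Claim_ definition above) =====
theorem find_smallest_reachable_vertices_spec : Claim_equal_find_smallest_reachable_vertices := by
  intro g _
  show find_smallest_reachable_vertices g = find_smallest_reachable_vertices_alt g
  exact congrArg PySem.Dict.items
    (pvOuter g (PySem.List.sorted (g.map Prod.fst) (fun x => x) false)
      PySem.Set.empty PySem.Dict.empty
      (fun v hv => (PySem.List.mem_sorted _ _ _ _).mp hv)
      (by intro x; simp [PySem.Dict.contains_empty, PySem.Set.empty]))
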